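-- pv_equiv track=rewrite | github.com/YUCHENYUXI/CPUDesign | l2硬布线8指令/实验/addcomma.py | process_input
-- ===== SOURCE A (Python) =====
-- def process_input(input_text):
--     # 将输入按行分割
--     lines = input_text.split('\n')
--     processed_lines = []
--
--     for line in lines:
--         # 对每一行中的每个字符用逗号分隔
--         processed_line = ','.join(line)
--         processed_lines.append(processed_line)
--
--     # 将处理后的行重新组合成一个字符串，保留换行符
--     result = '\n'.join(processed_lines)
--     return result
--
-- input_text = """000010011001000000001
-- 000110000000000010000
-- 001100000000000000011
-- 100000000001000000100
-- 000001000100000000000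
-- 001100000000000000110
-- 100000000010000000000
-- 001000000000001101000
-- 000000100100000000000
-- 011000000000101000000
-- 011000000000011000000
-- 001100000000000001100
-- 000000000100000000000
-- 100000000000001101101"""
-- ===== SOURCE B (Python) =====
-- def process_input(input_text):
--     # One flat pass: insert a comma before a char iff the previous and current chars are both non-newlines.
--     out = []
--     prev = None
--     for c in input_text:
--         if prev is not None and prev != '\n' and c != '\n':
--             out.append(',')
--         out.append(c)
--         prev = c
--     return ''.join(out)
-- ===== Notes on version B (the rewrite author's own statement) =====
-- stated objective: alternative
-- what changed: Replaces split('\n') + per-line ','.join + '\n'.join with a single character-by-character pass that threads the previous character and inserts a comma only between two non-newline characters.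
import Mathlib
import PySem

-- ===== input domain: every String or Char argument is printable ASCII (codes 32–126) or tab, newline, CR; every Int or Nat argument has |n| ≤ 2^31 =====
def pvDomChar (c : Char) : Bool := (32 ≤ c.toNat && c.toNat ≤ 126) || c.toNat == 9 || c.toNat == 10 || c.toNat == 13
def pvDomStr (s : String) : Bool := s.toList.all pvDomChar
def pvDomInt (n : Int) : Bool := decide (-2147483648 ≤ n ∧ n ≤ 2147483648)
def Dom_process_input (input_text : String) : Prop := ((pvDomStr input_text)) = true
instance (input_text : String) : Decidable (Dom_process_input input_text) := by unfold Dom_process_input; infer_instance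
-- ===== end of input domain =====

-- B replaces split('\n') + per-line ','.join + '\n'.join by one flat pass threading the previous character (alternative decomposition, same cost).

-- ===== PORT A =====
def process_input (input_text : String) : String :=
  let lines := PySem.Chars.splitOn input_text.toList ['\n']
  let processed_lines := lines.foldl
    (fun acc line => acc ++ [PySem.Chars.join [','] (line.map (fun c => [c]))])
    ([] : List (List Char))
  String.ofList (PySem.Chars.join ['\n'] processed_lines)

-- ===== PORT B =====
def process_input_alt (input_text : String) : String :=
  let r := input_text.toList.foldl
    (fun (st : List Char × Option Char) c =>
      let out := match st.2 with
        | none => st.1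
        | some p => if p ≠ '\n' ∧ c ≠ '\n' then st.1 ++ [','] else st.1
      (out ++ [c], some c))
    (([] : List Char), (none : Option Char))
  String.ofList r.1

-- ===== PRECONDITION & SPEC =====
def Spec_process_input (input_text : String) (out : String) : Prop := out = process_input_alt input_text
instance (input_text : String) (out : String) : Decidable (Spec_process_input input_text out) := by unfold Spec_process_input; infer_instance

-- ===== CLAIM (what is proved, stated in full; the proofs are below) =====
def Claim_equal_process_input : Prop := ∀ (input_text : String), Dom_process_input input_text → Spec_process_input input_text (process_input input_text)

-- ===== LEMMAS AND PROOFS =====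

-- simple structural model of splitOn on separator ['\n'] (proof helper)
def pvSplit : List Char → List Char → List (List Char)
  | [], cur => [cur.reverse]
  | c :: rest, cur => if c = '\n' then cur.reverse :: pvSplit rest [] else pvSplit rest (c :: cur)

-- ','-interleaving of a line (proof model of ','.join over the chars)
def pvCm : List Char → List Char
  | [] => []
  | [c] => [c]
  | c :: d :: rest => c :: ',' :: pvCm (d :: rest)

-- spec of B's loop: flag = "previous char exists and is not a newline"
def pvG : Bool → List Char → List Char
  | _, [] => []
  | b, c :: cs => (if b && decide (c ≠ '\n') then [','] else []) ++ c :: pvG (decide (c ≠ '\n')) cs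

theorem pvSplit_ne_nil (l cur : List Char) : pvSplit l cur ≠ [] := by
  induction l generalizing cur with
  | nil => simp [pvSplit]
  | cons c rest ih => by_cases h : c = '\n' <;> simp [pvSplit, h, ih]

theorem go_eq (l : List Char) : ∀ (fuel : Nat) (cur : List Char) (acc : List (List Char)),
    l.length < fuel →
    PySem.Chars.splitOn.go ['\n'] fuel l cur acc = acc.reverse ++ pvSplit l cur := by
  induction l with
  | nil =>
    intro fuel cur acc h
    match fuel, h with
    | fuel + 1, _ => simp [PySem.Chars.splitOn.go, pvSplit]
  | cons c rest ih =>
    intro fuel cur acc h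
    match fuel, h with
    | fuel + 1, h =>
      by_cases hc : c = '\n'
      · have hpre : List.isPrefixOf ['\n'] (c :: rest) = true := by
          simp [List.isPrefixOf, hc]
        simp only [PySem.Chars.splitOn.go, hpre, if_true, List.length_cons,
          List.length_nil, Nat.zero_add, List.drop_one, List.tail_cons]
        rw [ih fuel [] (cur.reverse :: acc) (by simpa using Nat.lt_of_succ_lt_succ h)]
        simp [pvSplit, hc]
      · have hpre : List.isPrefixOf ['\n'] (c :: rest) = false := by
          simp [List.isPrefixOf, Ne.symm hc]
        simp only [PySem.Chars.splitOn.go, hpre, Bool.false_eq_true, if_false]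
        rw [ih fuel (c :: cur) acc (by simpa using Nat.lt_of_succ_lt_succ h)]
        simp [pvSplit, hc]

theorem splitOn_eq_pvSplit (l : List Char) :
    PySem.Chars.splitOn l ['\n'] = pvSplit l [] := by
  show PySem.Chars.splitOn.go ['\n'] (l.length + 1) l [] [] = _
  rw [go_eq l (l.length + 1) [] [] (Nat.lt_succ_self _)]
  rfl

theorem join_comma_eq_pvCm (l : List Char) :
    PySem.Chars.join [','] (l.map (fun c => [c])) = pvCm l := by
  induction l with
  | nil => simp [pvCm, PySem.Chars.join_nil]
  | cons c rest ih =>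
    cases rest with
    | nil => simp [pvCm, PySem.Chars.join_singleton]
    | cons d rs =>
      simp only [List.map, PySem.Chars.join_cons_cons] at *
      simp [pvCm, ih]

theorem pvCm_append (xs : List Char) (c : Char) :
    pvCm (xs ++ [c]) = pvCm xs ++ (if xs.isEmpty then [] else [',']) ++ [c] := by
  induction xs with
  | nil => simp [pvCm]
  | cons a rest ih =>
    cases rest with
    | nil => simp [pvCm]
    | cons b rs =>
      simp only [List.cons_append, List.isEmpty_cons, Bool.false_eq_true, if_false] at ih
      simp [pvCm]
      simpa using ih

theorem join_cons_ne_nil (sep x : List Char) (ys : List (List Char)) (h : ys ≠ []) :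
    PySem.Chars.join sep (x :: ys) = x ++ sep ++ PySem.Chars.join sep ys := by
  cases ys with
  | nil => exact absurd rfl h
  | cons y rs => exact PySem.Chars.join_cons_cons sep x y rs

-- A's value from mid-line state cur equals pvCm of the finished prefix followed by pvG
theorem a_side (cs : List Char) : ∀ (cur : List Char),
    PySem.Chars.join ['\n'] ((pvSplit cs cur).map pvCm)
      = pvCm cur.reverse ++ pvG (!cur.isEmpty) cs := by
  induction cs with
  | nil => intro cur; simp [pvSplit, pvG, PySem.Chars.join_singleton]
  | cons c rest ih =>
    intro cur
    by_cases hc : c = '\n'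
    · simp only [pvSplit, if_pos hc, List.map]
      rw [join_cons_ne_nil _ _ _ (by simp [pvSplit_ne_nil]), ih []]
      subst hc
      simp [pvG, pvCm]
    · simp only [pvSplit, if_neg hc]
      rw [ih (c :: cur)]
      simp only [pvG]
      have : (c :: cur).reverse = cur.reverse ++ [c] := by simp
      rw [this, pvCm_append]
      cases cur <;> simp [hc]

-- B's loop from state (out, prev) appends pvG of the corresponding flag
theorem b_side (cs : List Char) : ∀ (out : List Char) (prev : Option Char),
    (cs.foldl
      (fun (st : List Char × Option Char) c =>
        ((match st.2 with
          | none => st.1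
          | some p => if p ≠ '\n' ∧ c ≠ '\n' then st.1 ++ [','] else st.1) ++ [c], some c)) (out, prev)).1
      = out ++ pvG (match prev with | none => false | some p => decide (p ≠ '\n')) cs := by
  induction cs with
  | nil => intro out prev; simp [pvG]
  | cons c rest ih =>
    intro out prev
    simp only [List.foldl]
    rw [ih]
    cases prev with
    | none => simp [pvG]
    | some p =>
      by_cases hp : p = '\n' <;> by_cases hc : c = '\n' <;>
        simp [pvG, hp, hc]

-- ===== VERDICT (by name: the statement is the Claim_ definition above) =====
theorem process_input_spec : Claim_equal_process_input := by
  intro s _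
  show process_input s = process_input_alt s
  unfold process_input process_input_alt
  simp only []
  rw [PySem.List.foldl_append_singleton_eq_map, splitOn_eq_pvSplit]
  simp only [List.nil_append]
  have ha : (pvSplit s.toList []).map (fun line => PySem.Chars.join [','] (line.map (fun c => [c])))
      = (pvSplit s.toList []).map pvCm := by
    apply List.map_congr_left
    intro line _
    exact join_comma_eq_pvCm line
  rw [ha, a_side s.toList [], b_side s.toList [] none]
  simp [pvCm]
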